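-- pv_equiv track=rewrite | github.com/amandahawbecker/SSBU_Characters__Win_Probability | Project_Share_Folder/2_Model_Scripts/build_matchup_dataset.py | normalize_character_name
-- ===== SOURCE A (Python) =====
-- def normalize_character_name(char_name):
--     """Normalize character names to match smash.csv"""
--     char_map = {
--         'pokemontrainer': 'pokemon trainer',
--         'pyra': 'pyra mythra',
--         'pyramythra': 'pyra mythra',
--         'mii brawler': 'mii brawler',
--         'mii swordfighter': 'mii swordfighter',
--         'mii gunner': 'mii gunner',
--         'mr game & watch': 'mr. game & watch',
--         'gamewatch': 'mr. game & watch',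
--         'dr mario': 'dr. mario',
--         'mariod': 'dr. mario',
--         'toonlink': 'toon link',
--         'younglink': 'young link',
--         'wiifittrainer': 'wii fit trainer',
--         'king k rool': 'king k. rool',
--         'kingkr': 'king k. rool',
--         'kingdedede': 'king dedede',
--         'banjokazooie': 'banjo & kazooie',
--         'diddykong': 'diddy kong',
--         'iceclimbers': 'ice climbers',
--         'rosalina': 'rosalina & luma',
--         'piranhaplant': 'piranha plant',
--         'zero suitsamus': 'zero suit samus',
--         'zerosuitsamus': 'zero suit samus',
--         'ridley': 'ridley',
--     }
--
--     char_name = char_name.lower().strip()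
--     # Remove 'ultimate/' prefix if present
--     char_name = char_name.replace('ultimate/', '')
--
--     # Check direct mapping
--     if char_name in char_map:
--         return char_map[char_name]
--
--     # Try to match by removing spaces/special chars
--     for key, value in char_map.items():
--         if key.replace(' ', '').replace('.', '').replace('&', '') == char_name.replace(' ', '').replace('.', '').replace('&', ''):
--             return value
--
--     # Return as-is (will need manual matching later)
--     return char_name
-- ===== SOURCE B (Python) =====
-- def normalize_character_name(char_name):
--     """Normalize character names to match smash.csv"""
--     name = char_name.lower().strip().replace('ultimate/', '')
--     # single-pass squash: drop spaces, dots and ampersands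
--     key = ''.join(ch for ch in name if ch not in ' .&')
--     match key:
--         case 'pokemontrainer': return 'pokemon trainer'
--         case 'pyra': return 'pyra mythra'
--         case 'pyramythra': return 'pyra mythra'
--         case 'miibrawler': return 'mii brawler'
--         case 'miiswordfighter': return 'mii swordfighter'
--         case 'miigunner': return 'mii gunner'
--         case 'mrgamewatch': return 'mr. game & watch'
--         case 'gamewatch': return 'mr. game & watch'
--         case 'drmario': return 'dr. mario'
--         case 'mariod': return 'dr. mario'
--         case 'toonlink': return 'toon link'
--         case 'younglink': return 'young link'
--         case 'wiifittrainer': return 'wii fit trainer'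
--         case 'kingkrool': return 'king k. rool'
--         case 'kingkr': return 'king k. rool'
--         case 'kingdedede': return 'king dedede'
--         case 'banjokazooie': return 'banjo & kazooie'
--         case 'diddykong': return 'diddy kong'
--         case 'iceclimbers': return 'ice climbers'
--         case 'rosalina': return 'rosalina & luma'
--         case 'piranhaplant': return 'piranha plant'
--         case 'zerosuitsamus': return 'zero suit samus'
--         case 'ridley': return 'ridley'
--         case _: return name
-- ===== Notes on version B (the rewrite author's own statement) =====
-- stated objective: simpler
-- what changed: A's dict plus a per-call linear scan that re-squashes every key with three replace passes is replaced by a single-pass character filter that squashes the name once, followed by one literal match over the pre-squashed keys (duplicate squashed keys merged), with the processed name as the fallthrough.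
import Mathlib
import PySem

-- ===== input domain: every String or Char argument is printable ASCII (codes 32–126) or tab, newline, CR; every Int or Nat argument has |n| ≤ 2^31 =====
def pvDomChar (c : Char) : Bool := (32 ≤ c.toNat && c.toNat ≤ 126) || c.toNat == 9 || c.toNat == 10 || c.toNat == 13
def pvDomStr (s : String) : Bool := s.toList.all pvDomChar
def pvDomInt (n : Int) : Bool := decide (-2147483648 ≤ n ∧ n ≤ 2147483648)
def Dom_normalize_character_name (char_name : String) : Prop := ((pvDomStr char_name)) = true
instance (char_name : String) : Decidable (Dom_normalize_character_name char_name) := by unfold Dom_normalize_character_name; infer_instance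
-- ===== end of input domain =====

-- B replaces A's dict + linear re-squashing scan by a single-pass character filter and a
-- literal match on the squashed name (duplicate squashed keys merged); objective: simpler.

-- ===== PORT A =====
-- s.replace(' ', '').replace('.', '').replace('&', '')  (A's squashing, three replace passes)
def pvSquash (s : String) : String :=
  PySem.Str.replace (PySem.Str.replace (PySem.Str.replace s " " "") "." "") "&" ""

def pvCharMap : PySem.Dict String String := PySem.Dict.ofList [
    ("pokemontrainer", "pokemon trainer"),
    ("pyra", "pyra mythra"),
    ("pyramythra", "pyra mythra"),
    ("mii brawler", "mii brawler"),
    ("mii swordfighter", "mii swordfighter"),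
    ("mii gunner", "mii gunner"),
    ("mr game & watch", "mr. game & watch"),
    ("gamewatch", "mr. game & watch"),
    ("dr mario", "dr. mario"),
    ("mariod", "dr. mario"),
    ("toonlink", "toon link"),
    ("younglink", "young link"),
    ("wiifittrainer", "wii fit trainer"),
    ("king k rool", "king k. rool"),
    ("kingkr", "king k. rool"),
    ("kingdedede", "king dedede"),
    ("banjokazooie", "banjo & kazooie"),
    ("diddykong", "diddy kong"),
    ("iceclimbers", "ice climbers"),
    ("rosalina", "rosalina & luma"),
    ("piranhaplant", "piranha plant"),
    ("zero suitsamus", "zero suit samus"),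
    ("zerosuitsamus", "zero suit samus"),
    ("ridley", "ridley")]

-- body of A after the lower/strip/replace preprocessing
def pvLookupA (c : String) : String :=
  -- if char_name in char_map: return char_map[char_name]
  match pvCharMap.get? c with
  | some v => v
  | none =>
    -- for key, value in char_map.items(): if squash(key) == squash(char_name): return value
    match pvCharMap.items.find? (fun kv => pvSquash kv.1 == pvSquash c) with
    | some kv => kv.2
    | none => c

def normalize_character_name (char_name : String) : String :=
  pvLookupA (PySem.Str.replace (PySem.Str.strip (PySem.Str.lower char_name)) "ultimate/" "")

-- ===== PORT B =====
-- ''.join(ch for ch in name if ch not in ' .&') = filter on the character list (exact: each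
-- kept ch is a 1-char string, '' .join concatenates them); the match statement is the
-- ordered chain of literal equality tests below, falling through to name.
def normalize_character_name_alt (char_name : String) : String :=
  let name := PySem.Str.replace (PySem.Str.strip (PySem.Str.lower char_name)) "ultimate/" ""
  let key := String.ofList (name.toList.filter (fun ch => !(ch == ' ' || ch == '.' || ch == '&')))
  if key = "pokemontrainer" then "pokemon trainer"
  else if key = "pyra" then "pyra mythra"
  else if key = "pyramythra" then "pyra mythra"
  else if key = "miibrawler" then "mii brawler"
  else if key = "miiswordfighter" then "mii swordfighter"
  else if key = "miigunner" then "mii gunner"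
  else if key = "mrgamewatch" then "mr. game & watch"
  else if key = "gamewatch" then "mr. game & watch"
  else if key = "drmario" then "dr. mario"
  else if key = "mariod" then "dr. mario"
  else if key = "toonlink" then "toon link"
  else if key = "younglink" then "young link"
  else if key = "wiifittrainer" then "wii fit trainer"
  else if key = "kingkrool" then "king k. rool"
  else if key = "kingkr" then "king k. rool"
  else if key = "kingdedede" then "king dedede"
  else if key = "banjokazooie" then "banjo & kazooie"
  else if key = "diddykong" then "diddy kong"
  else if key = "iceclimbers" then "ice climbers"
  else if key = "rosalina" then "rosalina & luma"
  else if key = "piranhaplant" then "piranha plant"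
  else if key = "zerosuitsamus" then "zero suit samus"
  else if key = "ridley" then "ridley"
  else name

-- ===== PRECONDITION & SPEC =====
def Spec_normalize_character_name (char_name : String) (out : String) : Prop := out = normalize_character_name_alt char_name
instance (char_name : String) (out : String) : Decidable (Spec_normalize_character_name char_name out) := by unfold Spec_normalize_character_name; infer_instance

-- ===== CLAIM (what is proved, stated in full; the proofs are below) =====
def Claim_equal_normalize_character_name : Prop := ∀ (char_name : String), Dom_normalize_character_name char_name → Spec_normalize_character_name char_name (normalize_character_name char_name)

-- ===== LEMMAS AND PROOFS =====

-- replace.go with a one-char pattern and empty replacement is a filter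
theorem pv_go_filter (x : Char) : ∀ (fuel : Nat) (l acc : List Char), l.length ≤ fuel →
    PySem.Chars.replace.go [x] [] fuel l acc = acc.reverse ++ l.filter (fun c => !(c == x)) := by
  intro fuel
  induction fuel with
  | zero =>
    intro l acc h
    have : l = [] := List.eq_nil_of_length_eq_zero (Nat.le_zero.mp h)
    subst this
    simp [PySem.Chars.replace.go]
  | succ n ih =>
    intro l acc h
    cases l with
    | nil => simp [PySem.Chars.replace.go]
    | cons c t =>
      simp only [PySem.Chars.replace.go]
      by_cases hc : c = x
      · subst hc
        have hp : List.isPrefixOf [c] (c :: t) = true := by simp [List.isPrefixOf]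
        simp only [hp, if_pos]
        rw [show List.drop (List.length [c]) (c :: t) = t from rfl]
        rw [ih t _ (by simpa using Nat.le_of_succ_le_succ h)]
        simp
      · have hpf : List.isPrefixOf [x] (c :: t) = false := by
          simp [List.isPrefixOf]
          exact fun hxc => absurd hxc.symm hc
        simp only [hpf]
        rw [if_neg (by simp)]
        rw [ih t _ (by simpa using Nat.le_of_succ_le_succ h)]
        simp [hc]

theorem pv_replace_single (l : List Char) (x : Char) :
    PySem.Chars.replace l [x] [] = l.filter (fun c => !(c == x)) := by
  rw [PySem.Chars.replace]
  simp only [List.isEmpty_cons]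
  rw [pv_go_filter x l.length l [] (le_refl _)]
  simp

-- A's three replace passes squash exactly like B's single filter pass
theorem pv_squash_eq (s : String) :
    String.ofList (s.toList.filter (fun ch => !(ch == ' ' || ch == '.' || ch == '&'))) = pvSquash s := by
  have hts : (pvSquash s).toList = s.toList.filter (fun ch => !(ch == ' ' || ch == '.' || ch == '&')) := by
    unfold pvSquash
    rw [PySem.Str.toList_replace, PySem.Str.toList_replace, PySem.Str.toList_replace]
    rw [show ("&" : String).toList = ['&'] from rfl, show ("." : String).toList = ['.'] from rfl,
        show (" " : String).toList = [' '] from rfl, show ("" : String).toList = [] from rfl,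
        pv_replace_single, pv_replace_single, pv_replace_single]
    rw [List.filter_filter, List.filter_filter]
    apply List.filter_congr
    intro c _
    cases hc1 : (c == ' ') <;> cases hc2 : (c == '.') <;> cases hc3 : (c == '&') <;> simp_all
  rw [← hts, String.ofList_toList]

set_option maxRecDepth 100000 in
set_option maxHeartbeats 4000000 in
theorem pv_core (c : String) :
    pvLookupA c =
      (let key := String.ofList (c.toList.filter (fun ch => !(ch == ' ' || ch == '.' || ch == '&')))
       if key = "pokemontrainer" then "pokemon trainer"
       else if key = "pyra" then "pyra mythra"
       else if key = "pyramythra" then "pyra mythra"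
       else if key = "miibrawler" then "mii brawler"
       else if key = "miiswordfighter" then "mii swordfighter"
       else if key = "miigunner" then "mii gunner"
       else if key = "mrgamewatch" then "mr. game & watch"
       else if key = "gamewatch" then "mr. game & watch"
       else if key = "drmario" then "dr. mario"
       else if key = "mariod" then "dr. mario"
       else if key = "toonlink" then "toon link"
       else if key = "younglink" then "young link"
       else if key = "wiifittrainer" then "wii fit trainer"
       else if key = "kingkrool" then "king k. rool"
       else if key = "kingkr" then "king k. rool"
       else if key = "kingdedede" then "king dedede"
       else if key = "banjokazooie" then "banjo & kazooie"
       else if key = "diddykong" then "diddy kong"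
       else if key = "iceclimbers" then "ice climbers"
       else if key = "rosalina" then "rosalina & luma"
       else if key = "piranhaplant" then "piranha plant"
       else if key = "zerosuitsamus" then "zero suit samus"
       else if key = "ridley" then "ridley"
       else c) := by
  have hC : pvCharMap.items = [("pokemontrainer", "pokemon trainer"), ("pyra", "pyra mythra"), ("pyramythra", "pyra mythra"), ("mii brawler", "mii brawler"), ("mii swordfighter", "mii swordfighter"), ("mii gunner", "mii gunner"), ("mr game & watch", "mr. game & watch"), ("gamewatch", "mr. game & watch"), ("dr mario", "dr. mario"), ("mariod", "dr. mario"), ("toonlink", "toon link"), ("younglink", "young link"), ("wiifittrainer", "wii fit trainer"), ("king k rool", "king k. rool"), ("kingkr", "king k. rool"), ("kingdedede", "king dedede"), ("banjokazooie", "banjo & kazooie"), ("diddykong", "diddy kong"), ("iceclimbers", "ice climbers"), ("rosalina", "rosalina & luma"), ("piranhaplant", "piranha plant"), ("zero suitsamus", "zero suit samus"), ("zerosuitsamus", "zero suit samus"), ("ridley", "ridley")] := by decide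
  have hs0 : pvSquash "pokemontrainer" = "pokemontrainer" := by decide
  have hs1 : pvSquash "pyra" = "pyra" := by decide
  have hs2 : pvSquash "pyramythra" = "pyramythra" := by decide
  have hs3 : pvSquash "mii brawler" = "miibrawler" := by decide
  have hs4 : pvSquash "mii swordfighter" = "miiswordfighter" := by decide
  have hs5 : pvSquash "mii gunner" = "miigunner" := by decide
  have hs6 : pvSquash "mr game & watch" = "mrgamewatch" := by decide
  have hs7 : pvSquash "gamewatch" = "gamewatch" := by decide
  have hs8 : pvSquash "dr mario" = "drmario" := by decide
  have hs9 : pvSquash "mariod" = "mariod" := by decide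
  have hs10 : pvSquash "toonlink" = "toonlink" := by decide
  have hs11 : pvSquash "younglink" = "younglink" := by decide
  have hs12 : pvSquash "wiifittrainer" = "wiifittrainer" := by decide
  have hs13 : pvSquash "king k rool" = "kingkrool" := by decide
  have hs14 : pvSquash "kingkr" = "kingkr" := by decide
  have hs15 : pvSquash "kingdedede" = "kingdedede" := by decide
  have hs16 : pvSquash "banjokazooie" = "banjokazooie" := by decide
  have hs17 : pvSquash "diddykong" = "diddykong" := by decide
  have hs18 : pvSquash "iceclimbers" = "iceclimbers" := by decide
  have hs19 : pvSquash "rosalina" = "rosalina" := by decide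
  have hs20 : pvSquash "piranhaplant" = "piranhaplant" := by decide
  have hs21 : pvSquash "zero suitsamus" = "zerosuitsamus" := by decide
  have hs22 : pvSquash "zerosuitsamus" = "zerosuitsamus" := by decide
  have hs23 : pvSquash "ridley" = "ridley" := by decide
  simp only [pv_squash_eq]
  unfold pvLookupA PySem.Dict.get?
  rw [hC]
  simp only [List.find?_cons, List.find?_nil]
  simp only [hs0, hs1, hs2, hs3, hs4, hs5, hs6, hs7, hs8, hs9, hs10, hs11, hs12, hs13, hs14, hs15, hs16, hs17, hs18, hs19, hs20, hs21, hs22, hs23]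
  by_cases h0 : ("pokemontrainer" == c) = true
  · obtain rfl := eq_of_beq h0
    decide
  · rw [Bool.not_eq_true] at h0; simp only [h0]
    by_cases h1 : ("pyra" == c) = true
    · obtain rfl := eq_of_beq h1
      decide
    · rw [Bool.not_eq_true] at h1; simp only [h1]
      by_cases h2 : ("pyramythra" == c) = true
      · obtain rfl := eq_of_beq h2
        decide
      · rw [Bool.not_eq_true] at h2; simp only [h2]
        by_cases h3 : ("mii brawler" == c) = true
        · obtain rfl := eq_of_beq h3
          decide
        · rw [Bool.not_eq_true] at h3; simp only [h3]
          by_cases h4 : ("mii swordfighter" == c) = true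
          · obtain rfl := eq_of_beq h4
            decide
          · rw [Bool.not_eq_true] at h4; simp only [h4]
            by_cases h5 : ("mii gunner" == c) = true
            · obtain rfl := eq_of_beq h5
              decide
            · rw [Bool.not_eq_true] at h5; simp only [h5]
              by_cases h6 : ("mr game & watch" == c) = true
              · obtain rfl := eq_of_beq h6
                decide
              · rw [Bool.not_eq_true] at h6; simp only [h6]
                by_cases h7 : ("gamewatch" == c) = true
                · obtain rfl := eq_of_beq h7
                  decide
                · rw [Bool.not_eq_true] at h7; simp only [h7]
                  by_cases h8 : ("dr mario" == c) = true
                  · obtain rfl := eq_of_beq h8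
                    decide
                  · rw [Bool.not_eq_true] at h8; simp only [h8]
                    by_cases h9 : ("mariod" == c) = true
                    · obtain rfl := eq_of_beq h9
                      decide
                    · rw [Bool.not_eq_true] at h9; simp only [h9]
                      by_cases h10 : ("toonlink" == c) = true
                      · obtain rfl := eq_of_beq h10
                        decide
                      · rw [Bool.not_eq_true] at h10; simp only [h10]
                        by_cases h11 : ("younglink" == c) = true
                        · obtain rfl := eq_of_beq h11
                          decide
                        · rw [Bool.not_eq_true] at h11; simp only [h11]
                          by_cases h12 : ("wiifittrainer" == c) = true
                          · obtain rfl := eq_of_beq h12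
                            decide
                          · rw [Bool.not_eq_true] at h12; simp only [h12]
                            by_cases h13 : ("king k rool" == c) = true
                            · obtain rfl := eq_of_beq h13
                              decide
                            · rw [Bool.not_eq_true] at h13; simp only [h13]
                              by_cases h14 : ("kingkr" == c) = true
                              · obtain rfl := eq_of_beq h14
                                decide
                              · rw [Bool.not_eq_true] at h14; simp only [h14]
                                by_cases h15 : ("kingdedede" == c) = true
                                · obtain rfl := eq_of_beq h15
                                  decide
                                · rw [Bool.not_eq_true] at h15; simp only [h15]
                                  by_cases h16 : ("banjokazooie" == c) = true
                                  · obtain rfl := eq_of_beq h16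
                                    decide
                                  · rw [Bool.not_eq_true] at h16; simp only [h16]
                                    by_cases h17 : ("diddykong" == c) = true
                                    · obtain rfl := eq_of_beq h17
                                      decide
                                    · rw [Bool.not_eq_true] at h17; simp only [h17]
                                      by_cases h18 : ("iceclimbers" == c) = true
                                      · obtain rfl := eq_of_beq h18
                                        decide
                                      · rw [Bool.not_eq_true] at h18; simp only [h18]
                                        by_cases h19 : ("rosalina" == c) = true
                                        · obtain rfl := eq_of_beq h19
                                          decide
                                        · rw [Bool.not_eq_true] at h19; simp only [h19]
                                          by_cases h20 : ("piranhaplant" == c) = true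
                                          · obtain rfl := eq_of_beq h20
                                            decide
                                          · rw [Bool.not_eq_true] at h20; simp only [h20]
                                            by_cases h21 : ("zero suitsamus" == c) = true
                                            · obtain rfl := eq_of_beq h21
                                              decide
                                            · rw [Bool.not_eq_true] at h21; simp only [h21]
                                              by_cases h22 : ("zerosuitsamus" == c) = true
                                              · obtain rfl := eq_of_beq h22
                                                decide
                                              · rw [Bool.not_eq_true] at h22; simp only [h22]
                                                by_cases h23 : ("ridley" == c) = true
                                                · obtain rfl := eq_of_beq h23
                                                  decide
                                                · rw [Bool.not_eq_true] at h23; simp only [h23]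
                                                  generalize pvSquash c = n
                                                  by_cases b0 : ("pokemontrainer" == n) = true
                                                  · obtain rfl := eq_of_beq b0
                                                    simp
                                                  · rw [Bool.not_eq_true] at b0
                                                    have b0n : ¬ (n = "pokemontrainer") := fun h => by subst h; simp at b0
                                                    simp only [b0]; rw [if_neg b0n]
                                                    by_cases b1 : ("pyra" == n) = true
                                                    · obtain rfl := eq_of_beq b1
                                                      simp
                                                    · rw [Bool.not_eq_true] at b1
                                                      have b1n : ¬ (n = "pyra") := fun h => by subst h; simp at b1
                                                      simp only [b1]; rw [if_neg b1n]
                                                      by_cases b2 : ("pyramythra" == n) = true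
                                                      · obtain rfl := eq_of_beq b2
                                                        simp
                                                      · rw [Bool.not_eq_true] at b2
                                                        have b2n : ¬ (n = "pyramythra") := fun h => by subst h; simp at b2
                                                        simp only [b2]; rw [if_neg b2n]
                                                        by_cases b3 : ("miibrawler" == n) = true
                                                        · obtain rfl := eq_of_beq b3
                                                          simp
                                                        · rw [Bool.not_eq_true] at b3
                                                          have b3n : ¬ (n = "miibrawler") := fun h => by subst h; simp at b3
                                                          simp only [b3]; rw [if_neg b3n]
                                                          by_cases b4 : ("miiswordfighter" == n) = true
                                                          · obtain rfl := eq_of_beq b4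
                                                            simp
                                                          · rw [Bool.not_eq_true] at b4
                                                            have b4n : ¬ (n = "miiswordfighter") := fun h => by subst h; simp at b4
                                                            simp only [b4]; rw [if_neg b4n]
                                                            by_cases b5 : ("miigunner" == n) = true
                                                            · obtain rfl := eq_of_beq b5
                                                              simp
                                                            · rw [Bool.not_eq_true] at b5
                                                              have b5n : ¬ (n = "miigunner") := fun h => by subst h; simp at b5
                                                              simp only [b5]; rw [if_neg b5n]
                                                              by_cases b6 : ("mrgamewatch" == n) = true
                                                              · obtain rfl := eq_of_beq b6
                                                                simp
                                                              · rw [Bool.not_eq_true] at b6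
                                                                have b6n : ¬ (n = "mrgamewatch") := fun h => by subst h; simp at b6
                                                                simp only [b6]; rw [if_neg b6n]
                                                                by_cases b7 : ("gamewatch" == n) = true
                                                                · obtain rfl := eq_of_beq b7
                                                                  simp
                                                                · rw [Bool.not_eq_true] at b7
                                                                  have b7n : ¬ (n = "gamewatch") := fun h => by subst h; simp at b7
                                                                  simp only [b7]; rw [if_neg b7n]
                                                                  by_cases b8 : ("drmario" == n) = true
                                                                  · obtain rfl := eq_of_beq b8
                                                                    simp
                                                                  · rw [Bool.not_eq_true] at b8
                                                                    have b8n : ¬ (n = "drmario") := fun h => by subst h; simp at b8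
                                                                    simp only [b8]; rw [if_neg b8n]
                                                                    by_cases b9 : ("mariod" == n) = true
                                                                    · obtain rfl := eq_of_beq b9
                                                                      simp
                                                                    · rw [Bool.not_eq_true] at b9
                                                                      have b9n : ¬ (n = "mariod") := fun h => by subst h; simp at b9
                                                                      simp only [b9]; rw [if_neg b9n]
                                                                      by_cases b10 : ("toonlink" == n) = true
                                                                      · obtain rfl := eq_of_beq b10
                                                                        simp
                                                                      · rw [Bool.not_eq_true] at b10
                                                                        have b10n : ¬ (n = "toonlink") := fun h => by subst h; simp at b10
                                                                        simp only [b10]; rw [if_neg b10n]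
                                                                        by_cases b11 : ("younglink" == n) = true
                                                                        · obtain rfl := eq_of_beq b11
                                                                          simp
                                                                        · rw [Bool.not_eq_true] at b11
                                                                          have b11n : ¬ (n = "younglink") := fun h => by subst h; simp at b11
                                                                          simp only [b11]; rw [if_neg b11n]
                                                                          by_cases b12 : ("wiifittrainer" == n) = true
                                                                          · obtain rfl := eq_of_beq b12
                                                                            simp
                                                                          · rw [Bool.not_eq_true] at b12
                                                                            have b12n : ¬ (n = "wiifittrainer") := fun h => by subst h; simp at b12
                                                                            simp only [b12]; rw [if_neg b12n]
                                                                            by_cases b13 : ("kingkrool" == n) = true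
                                                                            · obtain rfl := eq_of_beq b13
                                                                              simp
                                                                            · rw [Bool.not_eq_true] at b13
                                                                              have b13n : ¬ (n = "kingkrool") := fun h => by subst h; simp at b13
                                                                              simp only [b13]; rw [if_neg b13n]
                                                                              by_cases b14 : ("kingkr" == n) = true
                                                                              · obtain rfl := eq_of_beq b14
                                                                                simp
                                                                              · rw [Bool.not_eq_true] at b14
                                                                                have b14n : ¬ (n = "kingkr") := fun h => by subst h; simp at b14
                                                                                simp only [b14]; rw [if_neg b14n]
                                                                                by_cases b15 : ("kingdedede" == n) = true
                                                                                · obtain rfl := eq_of_beq b15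
                                                                                  simp
                                                                                · rw [Bool.not_eq_true] at b15
                                                                                  have b15n : ¬ (n = "kingdedede") := fun h => by subst h; simp at b15
                                                                                  simp only [b15]; rw [if_neg b15n]
                                                                                  by_cases b16 : ("banjokazooie" == n) = true
                                                                                  · obtain rfl := eq_of_beq b16
                                                                                    simp
                                                                                  · rw [Bool.not_eq_true] at b16
                                                                                    have b16n : ¬ (n = "banjokazooie") := fun h => by subst h; simp at b16
                                                                                    simp only [b16]; rw [if_neg b16n]
                                                                                    by_cases b17 : ("diddykong" == n) = true
                                                                                    · obtain rfl := eq_of_beq b17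
                                                                                      simp
                                                                                    · rw [Bool.not_eq_true] at b17
                                                                                      have b17n : ¬ (n = "diddykong") := fun h => by subst h; simp at b17
                                                                                      simp only [b17]; rw [if_neg b17n]
                                                                                      by_cases b18 : ("iceclimbers" == n) = true
                                                                                      · obtain rfl := eq_of_beq b18
                                                                                        simp
                                                                                      · rw [Bool.not_eq_true] at b18
                                                                                        have b18n : ¬ (n = "iceclimbers") := fun h => by subst h; simp at b18
                                                                                        simp only [b18]; rw [if_neg b18n]
                                                                                        by_cases b19 : ("rosalina" == n) = true
                                                                                        · obtain rfl := eq_of_beq b19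
                                                                                          simp
                                                                                        · rw [Bool.not_eq_true] at b19
                                                                                          have b19n : ¬ (n = "rosalina") := fun h => by subst h; simp at b19
                                                                                          simp only [b19]; rw [if_neg b19n]
                                                                                          by_cases b20 : ("piranhaplant" == n) = true
                                                                                          · obtain rfl := eq_of_beq b20
                                                                                            simp
                                                                                          · rw [Bool.not_eq_true] at b20
                                                                                            have b20n : ¬ (n = "piranhaplant") := fun h => by subst h; simp at b20
                                                                                            simp only [b20]; rw [if_neg b20n]
                                                                                            by_cases b21 : ("zerosuitsamus" == n) = true
                                                                                            · obtain rfl := eq_of_beq b21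
                                                                                              simp
                                                                                            · rw [Bool.not_eq_true] at b21
                                                                                              have b21n : ¬ (n = "zerosuitsamus") := fun h => by subst h; simp at b21
                                                                                              simp only [b21]; rw [if_neg b21n]
                                                                                              by_cases b22 : ("ridley" == n) = true
                                                                                              · obtain rfl := eq_of_beq b22
                                                                                                simp
                                                                                              · rw [Bool.not_eq_true] at b22
                                                                                                have b22n : ¬ (n = "ridley") := fun h => by subst h; simp at b22
                                                                                                simp only [b22]; rw [if_neg b22n]
                                                                                                simp

-- ===== VERDICT (by name: the statement is the Claim_ definition above) =====
set_option maxHeartbeats 1000000 in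
theorem normalize_character_name_spec : Claim_equal_normalize_character_name := by
  intro s _
  show normalize_character_name s = normalize_character_name_alt s
  unfold normalize_character_name normalize_character_name_alt
  exact pv_core _
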